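-- pv_equiv track=rewrite | github.com/pengyuhou/git_test1 | leetcode/面试题14- I. 剪绳子.py | cuttingRope
-- ===== SOURCE A (Python) =====
-- def cuttingRope(n: int) -> int:
--     ret = [None, 1, 2, 4, 6, 9]
--     if n < 7:
--         return ret[n - 1]
--     else:
--         index = 7
--         while index <= n:
--             ret.append(3 * ret[index - 4])
--             index += 1
--         return ret[-1]
-- ===== SOURCE B (Python) =====
-- def cuttingRope(n: int) -> int:
--     # O(1) closed form: cut into as many 3s as possible; table for small n.
--     small = {2: 1, 3: 2, 4: 4, 5: 6, 6: 9}
--     if n < 7: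
--         return small[n]
--     q, r = divmod(n, 3)
--     if r == 0:
--         return 3 ** q
--     if r == 1:
--         return 4 * 3 ** (q - 1)
--     return 2 * 3 ** q
-- ===== Notes on version B (the rewrite author's own statement) =====
-- stated objective: faster
-- what changed: Replaced A's O(n) DP loop that appends 3*ret[i-4] to a growing list with an O(1) closed form (factor out threes with remainder handling, dict table for n<7).
-- outside the precondition, e.g. on cuttingRope(0): A returns 9, B raises KeyError; on cuttingRope(1): A returns None, B raises KeyError; on cuttingRope(-1): A returns 6, B raises KeyError
import Mathlib
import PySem

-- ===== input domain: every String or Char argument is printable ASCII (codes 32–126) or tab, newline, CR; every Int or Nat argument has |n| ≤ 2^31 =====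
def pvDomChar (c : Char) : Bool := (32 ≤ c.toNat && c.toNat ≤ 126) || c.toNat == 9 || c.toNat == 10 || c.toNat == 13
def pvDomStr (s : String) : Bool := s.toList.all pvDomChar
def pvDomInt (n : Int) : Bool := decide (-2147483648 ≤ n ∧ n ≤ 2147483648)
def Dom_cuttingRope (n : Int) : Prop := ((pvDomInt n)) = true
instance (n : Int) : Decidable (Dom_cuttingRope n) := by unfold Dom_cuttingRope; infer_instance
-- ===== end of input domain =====

-- B replaces A's O(n) append-loop DP with an O(1) closed form (factor out threes); equality proved for all n ≥ 2.


-- ===== PORT A =====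
-- the while-loop: while index <= n: ret.append(3 * ret[index - 4]); index += 1
-- ret[index-4] is an Option Int cell; the .getD defaults are never hit under Pre_ (index-4 ≥ 3 there).
def cuttingRopeLoop (n : Int) (ret : List (Option Int)) (index : Int) : List (Option Int) :=
  if index ≤ n then
    cuttingRopeLoop n
      (ret ++ [some (3 * (((PySem.List.pyGet? ret (index - 4)).getD none).getD 0))]) (index + 1)
  else ret
termination_by (n + 1 - index).toNat
decreasing_by omega

def cuttingRope (n : Int) : Int :=
  let ret : List (Option Int) := [none, some 1, some 2, some 4, some 6, some 9]
  if n < 7 then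
    -- ret[n-1]; under Pre_ (2 ≤ n) the cell exists and is an int, so the defaults are never hit
    ((PySem.List.pyGet? ret (n - 1)).getD none).getD 0
  else
    -- ret[-1] after the loop
    ((PySem.List.pyGet? (cuttingRopeLoop n ret 7) (-1)).getD none).getD 0

-- ===== PORT B =====
def cuttingRope_alt (n : Int) : Int :=
  let small : PySem.Dict Int Int := PySem.Dict.ofList [(2, 1), (3, 2), (4, 4), (5, 6), (6, 9)]
  if n < 7 then
    -- small[n]; under Pre_ (2 ≤ n) the key is present, so the default is never hit
    (PySem.Dict.get? small n).getD 0
  else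
    let q := PySem.Int.floordiv n 3
    let r := PySem.Int.mod n 3
    if r = 0 then 3 ^ q.toNat
    else if r = 1 then 4 * 3 ^ (q - 1).toNat
    else 2 * 3 ^ q.toNat

-- ===== PRECONDITION & SPEC =====
-- Pre_ excludes n < 2: there A raises IndexError (n ≤ -6), returns None (n = 1, n = -5) — not an int —
-- or returns a negative-index-wraparound value (-5 < n ≤ 0); B raises KeyError on all of them.
def Pre_cuttingRope (n : Int) : Prop := 2 ≤ n
instance (n : Int) : Decidable (Pre_cuttingRope n) := by unfold Pre_cuttingRope; infer_instance
def pvWitness_cuttingRope : Int := 5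

def Spec_cuttingRope (n : Int) (out : Int) : Prop := out = cuttingRope_alt n
instance (n : Int) (out : Int) : Decidable (Spec_cuttingRope n out) := by unfold Spec_cuttingRope; infer_instance

-- ===== CLAIM (what is proved, stated in full; the proofs are below) =====
def Claim_equal_cuttingRope : Prop := ∀ (n : Int), Dom_cuttingRope n → Pre_cuttingRope n → Spec_cuttingRope n (cuttingRope n)

-- ===== LEMMAS AND PROOFS =====

-- the sequence A's list carries: position k of ret holds g k (position 0 holds None)
def g : ℕ → Int
  | 0 => 0
  | 1 => 1
  | 2 => 2
  | 3 => 4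
  | 4 => 6
  | 5 => 9
  | (k + 6) => 3 * g (k + 3)

theorem g_rec (j : ℕ) : g (j + 6) = 3 * g (j + 3) := rfl

-- the list A's loop maintains, as a function of its length - 1
def retOf (m : ℕ) : List (Option Int) := none :: (List.range' 1 m).map (fun i => some (g i))

theorem retOf_length (m : ℕ) : (retOf m).length = m + 1 := by simp [retOf]

theorem retOf_succ (m : ℕ) : retOf (m + 1) = retOf m ++ [some (g (m + 1))] := by
  simp [retOf, List.range'_concat, Nat.add_comm 1 m]

theorem retOf_get (m k : ℕ) (h1 : 1 ≤ k) (h2 : k ≤ m) :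
    (retOf m)[k]? = some (some (g k)) := by
  obtain ⟨k', rfl⟩ : ∃ k', k = k' + 1 := ⟨k - 1, by omega⟩
  simp [retOf, Nat.lt_of_succ_le h2, Nat.add_comm 1 k']

theorem loop_char (k m : ℕ) (h : 5 ≤ m) :
    cuttingRopeLoop ((m : Int) + 1 + k) (retOf m) ((m : Int) + 2) = retOf (m + k) := by
  induction k generalizing m with
  | zero => unfold cuttingRopeLoop; rw [if_neg (by push_cast; omega), Nat.add_zero]
  | succ k ih =>
    unfold cuttingRopeLoop
    rw [if_pos (by push_cast; omega)]
    have hidx : (m : Int) + 2 - 4 = ((m - 2 : ℕ) : Int) := by omega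
    have hg : PySem.List.pyGet? (retOf m) ((m : Int) + 2 - 4) = some (some (g (m - 2))) := by
      rw [hidx, PySem.List.pyGet?_natCast, retOf_get m (m - 2) (by omega) (by omega)]
    rw [hg]
    have happ : retOf m ++ [some (3 * (((some (some (g (m - 2)))).getD none).getD 0))]
        = retOf (m + 1) := by
      rw [retOf_succ]
      obtain ⟨j, rfl⟩ : ∃ j, m = j + 5 := ⟨m - 5, by omega⟩
      have : j + 5 - 2 = j + 3 := by omega
      simp [this, g_rec j]
    rw [happ]
    have hn : (m : Int) + 1 + (k + 1 : ℕ) = ((m + 1 : ℕ) : Int) + 1 + k := by push_cast; omega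
    have hi : (m : Int) + 2 + 1 = ((m + 1 : ℕ) : Int) + 2 := by push_cast; omega
    rw [hn, hi, ih (m + 1) (by omega)]
    congr 1
    omega

theorem A_char (n : Int) (h7 : 7 ≤ n) : cuttingRope n = g ((n - 1).toNat) := by
  have hret : ([none, some 1, some 2, some 4, some 6, some 9] : List (Option Int)) = retOf 5 := by
    decide
  unfold cuttingRope
  rw [if_neg (by omega)]
  have hloop : cuttingRopeLoop n (retOf 5) 7 = retOf ((n - 1).toNat) := by
    have h := loop_char ((n - 6).toNat) 5 (by omega)
    rw [show ((5 : ℕ) : Int) + 1 + (((n - 6).toNat : ℕ) : Int) = n by omega,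
        show ((5 : ℕ) : Int) + 2 = 7 by norm_num,
        show 5 + (n - 6).toNat = (n - 1).toNat by omega] at h
    exact h
  simp only [hret, hloop]
  rw [PySem.List.pyGet?_neg_one, List.getLast?_eq_getElem?]
  rw [retOf_length, Nat.add_sub_cancel, retOf_get _ _ (by omega) (by omega)]
  rfl

theorem alt_rec (n : Int) (h : 7 ≤ n) : cuttingRope_alt n = 3 * cuttingRope_alt (n - 3) := by
  by_cases h10 : n < 10
  · interval_cases n <;> decide
  · simp only [cuttingRope_alt]
    rw [if_neg (show ¬ n < 7 by omega), if_neg (show ¬ n - 3 < 7 by omega)]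
    have e1 := PySem.Int.floordiv_mul_add_mod n 3
    have e2 := PySem.Int.floordiv_mul_add_mod (n - 3) 3
    have b1 : 0 ≤ PySem.Int.mod n 3 := PySem.Int.mod_nonneg n (by norm_num)
    have b2 : PySem.Int.mod n 3 < 3 := PySem.Int.mod_lt n (by norm_num)
    have b3 : 0 ≤ PySem.Int.mod (n - 3) 3 := PySem.Int.mod_nonneg (n - 3) (by norm_num)
    have b4 : PySem.Int.mod (n - 3) 3 < 3 := PySem.Int.mod_lt (n - 3) (by norm_num)
    have hd : PySem.Int.floordiv (n - 3) 3 = PySem.Int.floordiv n 3 - 1 := by omega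
    have hm : PySem.Int.mod (n - 3) 3 = PySem.Int.mod n 3 := by omega
    have hq3 : 3 ≤ PySem.Int.floordiv n 3 := by omega
    rw [hd, hm]
    set q := PySem.Int.floordiv n 3 with hq
    by_cases h0 : PySem.Int.mod n 3 = 0
    · rw [if_pos h0, if_pos h0]
      have : q.toNat = (q - 1).toNat + 1 := by omega
      rw [this, pow_succ]; ring
    · rw [if_neg h0, if_neg h0]
      by_cases h1 : PySem.Int.mod n 3 = 1
      · rw [if_pos h1, if_pos h1]
        have : (q - 1).toNat = (q - 1 - 1).toNat + 1 := by omega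
        rw [this, pow_succ]; ring
      · rw [if_neg h1, if_neg h1]
        have : q.toNat = (q - 1).toNat + 1 := by omega
        rw [this, pow_succ]; ring

theorem alt_char (k : ℕ) : ∀ n : Int, 2 ≤ n → (n - 1).toNat = k → cuttingRope_alt n = g k := by
  induction k using Nat.strong_induction_on with
  | _ k ih =>
    intro n h2 hk
    by_cases h7 : n < 7
    · interval_cases n <;> (subst hk; decide)
    · rw [alt_rec n (by omega), ih ((n - 3 - 1).toNat) (by omega) (n - 3) (by omega) rfl]
      obtain ⟨j, hj⟩ : ∃ j : ℕ, n = (j : Int) + 7 := ⟨(n - 7).toNat, by omega⟩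
      have e1 : k = j + 6 := by omega
      have e2 : (n - 3 - 1).toNat = j + 3 := by omega
      rw [e1, e2, g_rec j]

-- ===== VERDICT (by name: the statement is the Claim_ definition above) =====
theorem cuttingRope_spec : Claim_equal_cuttingRope := by
  intro n _ hpre
  have h2 : 2 ≤ n := hpre
  unfold Spec_cuttingRope
  by_cases h7 : n < 7
  · interval_cases n <;> decide
  · rw [A_char n (by omega), alt_char ((n - 1).toNat) n (by omega) rfl]
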